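-- pv_equiv track=rewrite | github.com/gilsegev/Vectorize | backend/app/services/tuning.py | _component_stats
-- ===== SOURCE A (Python) =====
-- from collections import deque
--
-- def _component_stats(binary: list[int], width: int, height: int) -> tuple[int, int]:
--     visited = bytearray(len(binary))
--     small_components = 0
--     total_components = 0
--     deltas = (-1, 1, -width, width, -width - 1, -width + 1, width - 1, width + 1)
--     for idx, value in enumerate(binary):
--         if value != 0 or visited[idx]:
--             continue
--         total_components += 1
--         queue: deque[int] = deque([idx])
--         visited[idx] = 1
--         size = 0
--         while queue:
--             cur = queue.popleft()
--             size += 1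
--             x = cur % width
--             for d in deltas:
--                 nxt = cur + d
--                 if nxt < 0 or nxt >= len(binary):
--                     continue
--                 nx = nxt % width
--                 if abs(nx - x) > 1:
--                     continue
--                 if binary[nxt] == 0 and not visited[nxt]:
--                     visited[nxt] = 1
--                     queue.append(nxt)
--         if size < 40:
--             small_components += 1
--     return small_components, total_components
-- ===== SOURCE B (Python) =====
-- def _relax(binary, labels, width, n, i):
--     if labels[i] < 0:
--         return -1
--     best = labels[i]
--     x = i % width
--     for d in (-1, 1, -width, width, -width - 1, -width + 1, width - 1, width + 1):
--         j = i + d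
--         if 0 <= j < n and abs(j % width - x) <= 1 and labels[j] >= 0 and labels[j] < best:
--             best = labels[j]
--     return best
--
--
-- def _component_stats(binary: list[int], width: int, height: int) -> tuple[int, int]:
--     # Min-label propagation: every zero pixel starts labelled with its own index;
--     # each round every pixel takes the minimum label over itself and its neighbours,
--     # until a fixpoint (at most n rounds).  Afterwards a pixel's label is the least
--     # index of its connected component, so components correspond exactly to the
--     # pixels that kept their own index ("roots").
--     n = len(binary)
--     labels = [i if binary[i] == 0 else -1 for i in range(n)]
--     for _ in range(n):
--         new = [_relax(binary, labels, width, n, i) for i in range(n)]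
--         if new == labels:
--             break
--         labels = new
--     total = sum(1 for i, lab in enumerate(labels) if lab == i)
--     small = sum(1 for i, lab in enumerate(labels) if lab == i and labels.count(i) < 40)
--     return small, total
-- ===== Notes on version B (the rewrite author's own statement) =====
-- stated objective: alternative
-- what changed: B replaces A's per-component BFS flood fill (deque + visited bytearray + running counters) by whole-image min-label propagation: every zero pixel starts labelled with its own index, each round every pixel takes the minimum label over itself and its admissible neighbours until a fixpoint, after which a pixel's label is the least index of its component; components are then counted as the pixels that kept their own index, and small ones by counting occurrences of that label.
import Mathlib
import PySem

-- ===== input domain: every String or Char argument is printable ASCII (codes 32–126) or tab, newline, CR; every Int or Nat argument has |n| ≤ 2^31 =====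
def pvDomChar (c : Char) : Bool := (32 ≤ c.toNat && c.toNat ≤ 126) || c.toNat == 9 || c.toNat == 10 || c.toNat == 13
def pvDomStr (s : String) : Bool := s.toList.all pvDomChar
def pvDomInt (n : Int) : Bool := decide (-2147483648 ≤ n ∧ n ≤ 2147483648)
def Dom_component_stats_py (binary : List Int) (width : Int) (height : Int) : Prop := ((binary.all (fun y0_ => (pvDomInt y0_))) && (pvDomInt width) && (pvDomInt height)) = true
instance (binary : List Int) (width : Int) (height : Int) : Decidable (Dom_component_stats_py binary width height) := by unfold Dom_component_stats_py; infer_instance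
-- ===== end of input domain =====

-- B replaces A's per-component BFS flood fill by whole-image min-label propagation (each zero pixel
-- iteratively takes the least label in its neighbourhood until a fixpoint), then counts the pixels
-- that kept their own index (objective: alternative algorithm, same result, not faster).


-- ===== PORT A =====
-- A's `deltas` tuple
def pvDeltasA (width : Int) : List Int :=
  [-1, 1, -width, width, -width - 1, -width + 1, width - 1, width + 1]

-- A's inner `for d in deltas` loop: bounds check, wrap guard, then mark + enqueue (append at the end)
def pvStepA (binary : List Int) (n : Int) (width : Int) (cur : Int) (x : Int)
    (st : List Nat × List Int) (d : Int) : List Nat × List Int :=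
  let nxt := cur + d
  if nxt < 0 ∨ n ≤ nxt then st
  else
    let nx := PySem.Int.mod nxt width
    if 1 < (nx - x).natAbs then st
    else if PySem.List.pyGetD binary nxt 0 = 0 ∧ PySem.List.pyGetD st.1 nxt 0 = 0 then
      (PySem.List.pySetD st.1 nxt 1, st.2 ++ [nxt])
    else st

def pvScanA (binary : List Int) (n : Int) (width : Int) (cur : Int) (x : Int)
    (st : List Nat × List Int) : List Nat × List Int :=
  (pvDeltasA width).foldl (pvStepA binary n width cur x) st

-- A's `while queue` BFS loop (deque: pop from the front); fuel only makes the recursion total,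
-- binary.length + 1 always suffices (each pixel is enqueued at most once)
def pvBfsA (binary : List Int) (n : Int) (width : Int) :
    Nat → List Nat → List Int → Int → List Nat × Int
  | 0, vis, _, size => (vis, size)
  | fuel + 1, vis, q, size =>
    match q with
    | [] => (vis, size)
    | cur :: rest =>
      let x := PySem.Int.mod cur width
      let st := pvScanA binary n width cur x (vis, rest)
      pvBfsA binary n width fuel st.1 st.2 (size + 1)

-- A's outer `for idx, value in enumerate(binary)` loop with its two running counters
def pvOuterA (binary : List Int) (n : Int) (width : Int) :
    List (Int × Int) → List Nat → Int → Int → Int × Int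
  | [], _, small, total => (small, total)
  | (idx, value) :: rest, vis, small, total =>
    if value ≠ 0 ∨ PySem.List.pyGetD vis idx 0 ≠ 0 then
      pvOuterA binary n width rest vis small total
    else
      let r := pvBfsA binary n width (binary.length + 1)
                 (PySem.List.pySetD vis idx 1) [idx] 0
      pvOuterA binary n width rest r.1
        (if r.2 < 40 then small + 1 else small) (total + 1)

def component_stats_py (binary : List Int) (width : Int) (height : Int) : Int × Int :=
  pvOuterA binary (PySem.List.len binary) width (PySem.List.enumerate binary)
    (List.replicate binary.length 0) 0 0

-- ===== PORT B =====
-- B's delta tuple inside `_relax`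
def pvDeltasB (width : Int) : List Int :=
  [-1, 1, -width, width, -width - 1, -width + 1, width - 1, width + 1]

-- B's `_relax`: the running minimum over the pixel's own label and its admissible neighbours
def pvRelaxB (binary labels : List Int) (width n : Int) (i : Int) : Int :=
  if PySem.List.pyGetD labels i 0 < 0 then -1
  else
    let x := PySem.Int.mod i width
    (pvDeltasB width).foldl (fun best d =>
      let j := i + d
      if 0 ≤ j ∧ j < n ∧ (PySem.Int.mod j width - x).natAbs ≤ 1 ∧
          0 ≤ PySem.List.pyGetD labels j 0 ∧ PySem.List.pyGetD labels j 0 < best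
      then PySem.List.pyGetD labels j 0 else best)
      (PySem.List.pyGetD labels i 0)

-- one relaxation round: `new = [_relax(...) for i in range(n)]`
def pvStepRoundB (binary : List Int) (width n : Int) (labels : List Int) : List Int :=
  (PySem.List.pyRange 0 n 1).map (pvRelaxB binary labels width n)

-- B's `for _ in range(n)` loop with the early `break` at a fixpoint
def pvRoundsB (binary : List Int) (width n : Int) : Nat → List Int → List Int
  | 0, labels => labels
  | f + 1, labels =>
      let new := pvStepRoundB binary width n labels
      if new = labels then labels else pvRoundsB binary width n f new

def component_stats_py_alt (binary : List Int) (width : Int) (height : Int) : Int × Int :=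
  let n := PySem.List.len binary
  let labels0 := (PySem.List.pyRange 0 n 1).map
      (fun i => if PySem.List.pyGetD binary i 0 = 0 then i else -1)
  let labels := pvRoundsB binary width n binary.length labels0
  let total : Int := ((PySem.List.enumerate labels).countP (fun p => p.2 == p.1) : Int)
  let small : Int := ((PySem.List.enumerate labels).countP
      (fun p => p.2 == p.1 && decide (PySem.List.count labels p.1 < 40)) : Int)
  (small, total)

-- ===== PRECONDITION & SPEC =====
-- Pre_ excludes width = 0 together with a zero pixel: there `cur % width` (resp. `i % width`)
-- raises ZeroDivisionError in A (and in B alike); on every other input A returns normally.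
def Pre_component_stats_py (binary : List Int) (width : Int) (height : Int) : Prop :=
  width ≠ 0 ∨ ¬ (0 ∈ binary)
instance (binary : List Int) (width : Int) (height : Int) : Decidable (Pre_component_stats_py binary width height) := by unfold Pre_component_stats_py; infer_instance

def pvWitness_component_stats_py : List Int × Int × Int := ([0, 0, 1, 0], 2, 2)

def Spec_component_stats_py (binary : List Int) (width : Int) (height : Int) (out : Int × Int) : Prop := out = component_stats_py_alt binary width height
instance (binary : List Int) (width : Int) (height : Int) (out : Int × Int) : Decidable (Spec_component_stats_py binary width height out) := by unfold Spec_component_stats_py; infer_instance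

-- ===== CLAIM (what is proved, stated in full; the proofs are below) =====
def Claim_equal_component_stats_py : Prop := ∀ (binary : List Int) (width : Int) (height : Int), Dom_component_stats_py binary width height → Pre_component_stats_py binary width height → Spec_component_stats_py binary width height (component_stats_py binary width height)

-- ===== LEMMAS AND PROOFS =====

-- abstraction of A's visited bytearray as the finite set of marked in-range indices
noncomputable def pvAbsA (vis : List Nat) : Finset ℤ :=
  (Finset.Ico (0 : ℤ) (vis.length : ℤ)).filter (fun i => PySem.List.pyGetD vis i 0 ≠ 0)

-- the common acceptance test of both inner loops (bounds, wrap guard, zero pixel)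
def pvOk (binary : List Int) (width : Int) (cur : Int) (nxt : Int) : Bool :=
  decide (0 ≤ nxt) && decide (nxt < (binary.length : Int)) &&
  decide ((PySem.Int.mod nxt width - PySem.Int.mod cur width).natAbs ≤ 1) &&
  decide (PySem.List.pyGetD binary nxt 0 = 0)

-- accepted candidates among `cands`
def pvOkS (binary : List Int) (width : Int) (cur : Int) (cands : List Int) : Finset ℤ :=
  (cands.filter (pvOk binary width cur)).toFinset

-- the common neighbour set of a pixel
def pvNbr (binary : List Int) (width : Int) (cur : Int) : Finset ℤ :=
  pvOkS binary width cur ((pvDeltasA width).map (fun d => cur + d))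

-- pixels reachable from the seed set S, never stepping into the blocked set v
inductive pvReach (binary : List Int) (width : Int) (v : Finset ℤ) (S : Finset ℤ) : ℤ → Prop
  | seed {x : ℤ} : x ∈ S → pvReach binary width v S x
  | step {p x : ℤ} : pvReach binary width v S p → x ∈ pvNbr binary width p → x ∉ v →
      pvReach binary width v S x

lemma pvOk_bounds {binary : List Int} {width cur nxt : Int}
    (h : pvOk binary width cur nxt = true) : 0 ≤ nxt ∧ nxt < (binary.length : Int) := by
  simp only [pvOk, Bool.and_eq_true, decide_eq_true_eq] at h
  exact ⟨h.1.1.1, h.1.1.2⟩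

lemma pvReach_finite (binary : List Int) (width : Int) (v S : Finset ℤ) :
    Set.Finite {x | pvReach binary width v S x} := by
  apply Set.Finite.subset ((Finset.finite_toSet S).union (Set.finite_Ico (0 : ℤ) (binary.length : ℤ)))
  intro x hx
  cases hx with
  | seed h => exact Or.inl h
  | @step p _ _ hn _ =>
      refine Or.inr ?_
      have hok : pvOk binary width p x = true := by
        simp only [pvNbr, pvOkS, List.mem_toFinset, List.mem_filter] at hn
        exact hn.2
      have := pvOk_bounds hok
      simpa [Set.mem_Ico] using this

-- the closure (component) as a finite set; proof-side only
noncomputable def pvCl (binary : List Int) (width : Int) (v S : Finset ℤ) : Finset ℤ :=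
  (pvReach_finite binary width v S).toFinset

lemma mem_pvCl {binary : List Int} {width : Int} {v S : Finset ℤ} {x : ℤ} :
    x ∈ pvCl binary width v S ↔ pvReach binary width v S x := by
  simp [pvCl, Set.Finite.mem_toFinset]

lemma pvCl_empty (binary : List Int) (width : Int) (v : Finset ℤ) :
    pvCl binary width v ∅ = ∅ := by
  ext x
  simp only [mem_pvCl, Finset.notMem_empty, iff_false]
  intro h
  induction h with
  | seed h => simp at h
  | step _ _ _ ih => exact ih

lemma pvReach_mem_or {binary : List Int} {width : Int} {v S : Finset ℤ} {x : ℤ}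
    (h : pvReach binary width v S x) : x ∈ S ∨ x ∉ v := by
  induction h with
  | seed h => exact Or.inl h
  | step _ _ hv => exact Or.inr hv

lemma pvCl_expand {binary : List Int} {width : Int} {v S : Finset ℤ} {h : ℤ}
    (hhv : h ∈ v) :
    pvCl binary width v (insert h S) =
      insert h (pvCl binary width (v ∪ pvNbr binary width h)
        (S ∪ (pvNbr binary width h \ v))) := by
  ext x
  simp only [mem_pvCl, Finset.mem_insert]
  constructor
  · intro hr
    induction hr with
    | @seed y hy =>
        rcases Finset.mem_insert.mp hy with h1 | h1
        · exact Or.inl h1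
        · exact Or.inr (pvReach.seed (Finset.mem_union_left _ h1))
    | @step p y hp hn hv ih =>
        rcases ih with rfl | ih
        · exact Or.inr (pvReach.seed (Finset.mem_union_right _ (Finset.mem_sdiff.mpr ⟨hn, hv⟩)))
        · by_cases hyN : y ∈ pvNbr binary width h
          · exact Or.inr (pvReach.seed (Finset.mem_union_right _ (Finset.mem_sdiff.mpr ⟨hyN, hv⟩)))
          · refine Or.inr (pvReach.step ih hn ?_)
            simp only [Finset.mem_union]
            tauto
  · intro hr
    rcases hr with rfl | hr
    · exact pvReach.seed (Finset.mem_insert_self _ _)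
    · induction hr with
      | @seed y hy =>
          rcases Finset.mem_union.mp hy with h1 | h1
          · exact pvReach.seed (Finset.mem_insert_of_mem h1)
          · rcases Finset.mem_sdiff.mp h1 with ⟨hyN, hyv⟩
            exact pvReach.step (pvReach.seed (Finset.mem_insert_self _ _)) hyN hyv
      | @step p y hp hn hv ih =>
          refine pvReach.step ih hn ?_
          intro hyv
          exact hv (Finset.mem_union_left _ hyv)

lemma pvCl_expand_not_mem {binary : List Int} {width : Int} {v S : Finset ℤ} {h : ℤ}
    (hhv : h ∈ v) (hhS : h ∉ S) :
    h ∉ pvCl binary width (v ∪ pvNbr binary width h) (S ∪ (pvNbr binary width h \ v)) := by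
  intro hmem
  rcases pvReach_mem_or (mem_pvCl.mp hmem) with hs | hv
  · rcases Finset.mem_union.mp hs with h1 | h1
    · exact hhS h1
    · exact (Finset.mem_sdiff.mp h1).2 hhv
  · exact hv (Finset.mem_union_left _ hhv)

lemma pvCl_expand_card {binary : List Int} {width : Int} {v S : Finset ℤ} {h : ℤ}
    (hhv : h ∈ v) (hhS : h ∉ S) :
    (pvCl binary width v (insert h S)).card =
      (pvCl binary width (v ∪ pvNbr binary width h)
        (S ∪ (pvNbr binary width h \ v))).card + 1 := by
  rw [pvCl_expand hhv, Finset.card_insert_of_notMem (pvCl_expand_not_mem hhv hhS)]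

lemma pvCl_expand_union {binary : List Int} {width : Int} {v S : Finset ℤ} {h : ℤ}
    (hhv : h ∈ v) :
    v ∪ pvCl binary width v (insert h S) =
      (v ∪ pvNbr binary width h) ∪
        pvCl binary width (v ∪ pvNbr binary width h)
          (S ∪ (pvNbr binary width h \ v)) := by
  rw [pvCl_expand hhv]
  ext x
  simp only [Finset.mem_union, Finset.mem_insert]
  constructor
  · rintro (hx | rfl | hx)
    · exact Or.inl (Or.inl hx)
    · exact Or.inl (Or.inl hhv)
    · exact Or.inr hx
  · rintro ((hx | hx) | hx)
    · exact Or.inl hx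
    · by_cases hxv : x ∈ v
      · exact Or.inl hxv
      · exact Or.inr (Or.inr (mem_pvCl.mpr (pvReach.seed
          (Finset.mem_union_right _ (Finset.mem_sdiff.mpr ⟨hx, hxv⟩)))))
    · exact Or.inr (Or.inr hx)

lemma mem_pvAbsA {vis : List Nat} {x : ℤ} :
    x ∈ pvAbsA vis ↔ 0 ≤ x ∧ x < (vis.length : ℤ) ∧ PySem.List.pyGetD vis x 0 ≠ 0 := by
  simp [pvAbsA, Finset.mem_filter, Finset.mem_Ico, and_assoc]

lemma pvAbsA_replicate (m : ℕ) : pvAbsA (List.replicate m 0) = ∅ := by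
  ext x
  simp only [mem_pvAbsA, Finset.notMem_empty, iff_false, not_and, List.length_replicate]
  intro h0 h1
  rw [PySem.List.pyGetD_eq_getElem _ 0 h0 (by simpa using h1)]
  simp

lemma pvAbsA_set {vis : List Nat} {i : ℤ} (h0 : 0 ≤ i) (h1 : i < (vis.length : ℤ)) :
    pvAbsA (PySem.List.pySetD vis i 1) = insert i (pvAbsA vis) := by
  obtain ⟨j, rfl⟩ : ∃ j : ℕ, i = (j : ℤ) := ⟨i.toNat, (Int.toNat_of_nonneg h0).symm⟩
  have hj : j < vis.length := by exact_mod_cast h1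
  ext x
  by_cases hx0 : 0 ≤ x
  · obtain ⟨m, rfl⟩ : ∃ m : ℕ, x = (m : ℤ) := ⟨x.toNat, (Int.toNat_of_nonneg hx0).symm⟩
    simp only [mem_pvAbsA, Finset.mem_insert, PySem.List.length_pySetD,
      PySem.List.pyGetD_pySetD_natCast vis j m 1 0 hj]
    by_cases hm : m = j
    · subst hm
      simp [hj, h1]
    · simp only [hm, if_false, Int.natCast_inj]
      tauto
  · have hxj : ¬ (x = (j : ℤ)) := by
      intro hx; exact hx0 (hx ▸ Int.natCast_nonneg j)
    simp only [mem_pvAbsA, Finset.mem_insert, PySem.List.length_pySetD]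
    constructor
    · intro hmem; exact absurd hmem.1 hx0
    · rintro (hx | hmem)
      · exact absurd hx hxj
      · exact absurd hmem.1 hx0

lemma pvOkS_cons (binary : List Int) (width cur c : Int) (cands : List Int) :
    pvOkS binary width cur (c :: cands) =
      if pvOk binary width cur c then insert c (pvOkS binary width cur cands)
      else pvOkS binary width cur cands := by
  simp only [pvOkS, List.filter_cons]
  split <;> simp

lemma pvOk_false_of_bounds {binary : List Int} {width cur nxt : Int}
    (h : nxt < 0 ∨ (binary.length : ℤ) ≤ nxt) : pvOk binary width cur nxt = false := by
  cases hpv : pvOk binary width cur nxt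
  · rfl
  · exact absurd (pvOk_bounds hpv) (by omega)

lemma pvOk_false_of_wrap {binary : List Int} {width cur nxt : Int}
    (h : 1 < (PySem.Int.mod nxt width - PySem.Int.mod cur width).natAbs) :
    pvOk binary width cur nxt = false := by
  cases hpv : pvOk binary width cur nxt
  · rfl
  · simp only [pvOk, Bool.and_eq_true, decide_eq_true_eq] at hpv
    omega

lemma pvOk_false_of_nonzero {binary : List Int} {width cur nxt : Int}
    (h : ¬ PySem.List.pyGetD binary nxt 0 = 0) : pvOk binary width cur nxt = false := by
  cases hpv : pvOk binary width cur nxt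
  · rfl
  · simp only [pvOk, Bool.and_eq_true, decide_eq_true_eq] at hpv
    exact absurd hpv.2 h

lemma pvOk_true {binary : List Int} {width cur nxt : Int}
    (h1 : ¬ (nxt < 0 ∨ (binary.length : ℤ) ≤ nxt))
    (h2 : ¬ 1 < (PySem.Int.mod nxt width - PySem.Int.mod cur width).natAbs)
    (h3 : PySem.List.pyGetD binary nxt 0 = 0) : pvOk binary width cur nxt = true := by
  simp only [pvOk, Bool.and_eq_true, decide_eq_true_eq]
  refine ⟨⟨⟨by omega, by omega⟩, by omega⟩, h3⟩

lemma pvNotMem_absA {vis : List Nat} {nxt : Int}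
    (h : PySem.List.pyGetD vis nxt 0 = 0) : nxt ∉ pvAbsA vis := by
  intro hmem
  exact (mem_pvAbsA.mp hmem).2.2 h

-- characterisation of A's inner loop over an arbitrary candidate-offset list
lemma pvScanA_spec (binary : List Int) (width cur : Int) :
    ∀ (ds : List Int) (vis : List Nat) (q : List Int), vis.length = binary.length →
    ∃ adds : List Int,
      (ds.foldl (pvStepA binary (binary.length : Int) width cur (PySem.Int.mod cur width)) (vis, q)).2
          = q ++ adds ∧
      adds.Nodup ∧
      (∀ y, y ∈ adds ↔ y ∈ pvOkS binary width cur (ds.map (fun d => cur + d)) ∧ y ∉ pvAbsA vis) ∧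
      (ds.foldl (pvStepA binary (binary.length : Int) width cur (PySem.Int.mod cur width)) (vis, q)).1.length = binary.length ∧
      pvAbsA (ds.foldl (pvStepA binary (binary.length : Int) width cur (PySem.Int.mod cur width)) (vis, q)).1
          = pvAbsA vis ∪ pvOkS binary width cur (ds.map (fun d => cur + d)) := by
  intro ds
  induction ds with
  | nil =>
      intro vis q hlen
      exact ⟨[], by simp, List.nodup_nil, by simp [pvOkS], by simpa using hlen,
        by simp [pvOkS]⟩
  | cons d ds ih =>
      intro vis q hlen
      simp only [List.foldl_cons, List.map_cons, pvOkS_cons]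
      by_cases hb : cur + d < 0 ∨ (binary.length : ℤ) ≤ cur + d
      · have hstep : pvStepA binary (binary.length : ℤ) width cur (PySem.Int.mod cur width)
            (vis, q) d = (vis, q) := by simp [pvStepA, hb]
        rw [hstep, pvOk_false_of_bounds hb, if_neg (by simp)]
        exact ih vis q hlen
      · by_cases hw : 1 < (PySem.Int.mod (cur + d) width - PySem.Int.mod cur width).natAbs
        · have hstep : pvStepA binary (binary.length : ℤ) width cur (PySem.Int.mod cur width)
              (vis, q) d = (vis, q) := by simp [pvStepA, hb, hw]
          rw [hstep, pvOk_false_of_wrap hw, if_neg (by simp)]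
          exact ih vis q hlen
        · by_cases hz : PySem.List.pyGetD binary (cur + d) 0 = 0
          · by_cases hv : PySem.List.pyGetD vis (cur + d) 0 = 0
            · -- accepted: mark and enqueue
              have hstep : pvStepA binary (binary.length : ℤ) width cur (PySem.Int.mod cur width)
                  (vis, q) d = (PySem.List.pySetD vis (cur + d) 1, q ++ [cur + d]) := by
                simp [pvStepA, hb, hw, hz, hv]
              rw [hstep, pvOk_true hb hw hz, if_pos (by simp)]
              have hlen' : (PySem.List.pySetD vis (cur + d) 1).length = binary.length := by
                rw [PySem.List.length_pySetD]; exact hlen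
              obtain ⟨adds, h1, h2, h3, h4, h5⟩ := ih (PySem.List.pySetD vis (cur + d) 1) (q ++ [cur + d]) hlen'
              have habs : pvAbsA (PySem.List.pySetD vis (cur + d) 1) = insert (cur + d) (pvAbsA vis) :=
                pvAbsA_set (by omega) (by rw [hlen]; omega)
              have hnm : cur + d ∉ pvAbsA vis := pvNotMem_absA hv
              refine ⟨(cur + d) :: adds, by simpa using h1, ?_, ?_, h4, ?_⟩
              · refine List.nodup_cons.mpr ⟨fun hc => ?_, h2⟩
                have := (h3 _).mp hc
                rw [habs] at this
                exact this.2 (Finset.mem_insert_self _ _)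
              · intro y
                simp only [List.mem_cons, h3, habs, Finset.mem_insert]
                constructor
                · rintro (rfl | ⟨hy1, hy2⟩)
                  · exact ⟨Or.inl rfl, hnm⟩
                  · exact ⟨Or.inr hy1, fun hy => hy2 (Or.inr hy)⟩
                · rintro ⟨hy1, hy2⟩
                  by_cases hyc : y = cur + d
                  · exact Or.inl hyc
                  · rcases hy1 with rfl | hy1
                    · exact absurd rfl hyc
                    · refine Or.inr ⟨hy1, ?_⟩
                      rintro (rfl | hy)
                      · exact hyc rfl
                      · exact hy2 hy
              · rw [h5, habs, Finset.insert_union, Finset.union_insert]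
            · -- pixel already visited: skip, but it is an accepted candidate
              have hstep : pvStepA binary (binary.length : ℤ) width cur (PySem.Int.mod cur width)
                  (vis, q) d = (vis, q) := by simp [pvStepA, hb, hw, hz, hv]
              rw [hstep, pvOk_true hb hw hz, if_pos (by simp)]
              obtain ⟨adds, h1, h2, h3, h4, h5⟩ := ih vis q hlen
              have hmm : cur + d ∈ pvAbsA vis := by
                rw [mem_pvAbsA, hlen]
                exact ⟨by omega, by omega, hv⟩
              refine ⟨adds, h1, h2, ?_, h4, ?_⟩
              · intro y
                rw [h3]
                constructor
                · rintro ⟨hy1, hy2⟩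
                  exact ⟨Finset.mem_insert_of_mem hy1, hy2⟩
                · rintro ⟨hy1, hy2⟩
                  rcases Finset.mem_insert.mp hy1 with rfl | hy1
                  · exact absurd hmm hy2
                  · exact ⟨hy1, hy2⟩
              · rw [h5, Finset.union_insert, Finset.insert_eq_self.mpr (Finset.mem_union_left _ hmm)]
          · -- not a zero pixel: rejected
            have hstep : pvStepA binary (binary.length : ℤ) width cur (PySem.Int.mod cur width)
                (vis, q) d = (vis, q) := by simp [pvStepA, hb, hw, hz]
            rw [hstep, pvOk_false_of_nonzero hz, if_neg (by simp)]
            exact ih vis q hlen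

lemma mem_pvOkS_bounds {binary : List Int} {width cur y : Int} {cands : List Int}
    (h : y ∈ pvOkS binary width cur cands) : 0 ≤ y ∧ y < (binary.length : ℤ) := by
  simp only [pvOkS, List.mem_toFinset, List.mem_filter] at h
  exact pvOk_bounds h.2

-- the in-range index set
noncomputable def pvValid (len : ℕ) : Finset ℤ := Finset.Ico (0 : ℤ) (len : ℤ)

lemma pvValid_card (len : ℕ) : (pvValid len).card = len := by
  simp [pvValid]

-- A's BFS loop computes the closure of its queue, whatever the pop order
lemma pvBfsA_run (binary : List Int) (width : Int) :
    ∀ (fuel : ℕ) (vis : List Nat) (q : List Int) (size : Int),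
    vis.length = binary.length → q.Nodup → (∀ x ∈ q, x ∈ pvAbsA vis) →
    (pvValid binary.length \ pvAbsA vis).card + q.length ≤ fuel →
    pvAbsA (pvBfsA binary (binary.length : Int) width fuel vis q size).1
        = pvAbsA vis ∪ pvCl binary width (pvAbsA vis) q.toFinset ∧
    (pvBfsA binary (binary.length : Int) width fuel vis q size).2
        = size + ((pvCl binary width (pvAbsA vis) q.toFinset).card : Int) ∧
    (pvBfsA binary (binary.length : Int) width fuel vis q size).1.length = binary.length := by
  intro fuel
  induction fuel with
  | zero =>
      intro vis q size hlen hnd hsub hfuel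
      have hq : q = [] := by
        cases q with
        | nil => rfl
        | cons a t => simp at hfuel
      subst hq
      simp only [pvBfsA, List.toFinset_nil, pvCl_empty]
      exact ⟨by simp, by simp, hlen⟩
  | succ fuel ih =>
      intro vis q size hlen hnd hsub hfuel
      cases q with
      | nil =>
          simp only [pvBfsA, List.toFinset_nil, pvCl_empty]
          exact ⟨by simp, by simp, hlen⟩
      | cons cur rest =>
          obtain ⟨adds, h1, h2, h3, h4, h5⟩ :=
            pvScanA_spec binary width cur (pvDeltasA width) vis rest hlen
          have hOkSA : pvOkS binary width cur ((pvDeltasA width).map (fun d => cur + d))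
              = pvNbr binary width cur := rfl
          rw [hOkSA] at h3 h5
          have hrw : pvBfsA binary (binary.length : ℤ) width (fuel + 1) vis (cur :: rest) size
              = pvBfsA binary (binary.length : ℤ) width fuel
                  (((pvDeltasA width).foldl (pvStepA binary (binary.length : ℤ) width cur
                    (PySem.Int.mod cur width)) (vis, rest))).1
                  (((pvDeltasA width).foldl (pvStepA binary (binary.length : ℤ) width cur
                    (PySem.Int.mod cur width)) (vis, rest))).2 (size + 1) := rfl
          rw [hrw, h1]
          set v := pvAbsA vis with hv
          have hcurv : cur ∈ v := hsub cur (List.mem_cons_self)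
          obtain ⟨hcurrest, hndrest⟩ := List.nodup_cons.mp hnd
          have hcurS : cur ∉ rest.toFinset := by
            simpa using hcurrest
          have haddsset : adds.toFinset = pvNbr binary width cur \ v := by
            ext y
            simp only [List.mem_toFinset, h3, Finset.mem_sdiff]
          have hNsub : pvNbr binary width cur \ v ⊆ pvValid binary.length \ v := by
            intro y hy
            rw [Finset.mem_sdiff] at hy ⊢
            refine ⟨?_, hy.2⟩
            have := mem_pvOkS_bounds hy.1
            simp [pvValid, Finset.mem_Ico, this]
          have hsd : pvValid binary.length \ (v ∪ pvNbr binary width cur)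
              = (pvValid binary.length \ v) \ (pvNbr binary width cur \ v) := by
            ext y
            simp only [Finset.mem_sdiff, Finset.mem_union]
            tauto
          have haddslen : adds.length = (pvNbr binary width cur \ v).card := by
            rw [← haddsset, List.toFinset_card_of_nodup h2]
          have hle : (pvNbr binary width cur \ v).card ≤ (pvValid binary.length \ v).card :=
            Finset.card_le_card hNsub
          have hcard : (pvValid binary.length \ (v ∪ pvNbr binary width cur)).card
              = (pvValid binary.length \ v).card - (pvNbr binary width cur \ v).card := by
            rw [hsd, Finset.card_sdiff_of_subset hNsub]
          have hfuel' : (pvValid binary.length \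
              pvAbsA ((pvDeltasA width).foldl (pvStepA binary (binary.length : ℤ) width cur
                (PySem.Int.mod cur width)) (vis, rest)).1).card + (rest ++ adds).length ≤ fuel := by
            rw [h5, List.length_append]
            simp only [List.length_cons] at hfuel
            omega
          have hsub' : ∀ x ∈ rest ++ adds,
              x ∈ pvAbsA ((pvDeltasA width).foldl (pvStepA binary (binary.length : ℤ) width cur
                (PySem.Int.mod cur width)) (vis, rest)).1 := by
            intro x hx
            rw [h5, Finset.mem_union]
            rcases List.mem_append.mp hx with hx | hx
            · exact Or.inl (hsub x (List.mem_cons_of_mem _ hx))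
            · exact Or.inr (by simpa using ((h3 x).mp hx).1)
          have hnd' : (rest ++ adds).Nodup := by
            rw [List.nodup_append]
            refine ⟨hndrest, h2, ?_⟩
            intro y hy z hz heq
            subst heq
            have hyv : y ∈ v := hsub y (List.mem_cons_of_mem _ hy)
            exact ((h3 y).mp hz).2 hyv
          obtain ⟨ih1, ih2, ih3⟩ := ih _ (rest ++ adds) (size + 1) h4 hnd' hsub' hfuel'
          have htf : (rest ++ adds).toFinset = rest.toFinset ∪ (pvNbr binary width cur \ v) := by
            rw [List.toFinset_append, haddsset]
          rw [htf, h5] at ih1 ih2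
          have hexp := pvCl_expand_union (binary := binary) (width := width)
            (S := rest.toFinset) hcurv
          have hcardexp := pvCl_expand_card (binary := binary) (width := width)
            (S := rest.toFinset) hcurv hcurS
          refine ⟨?_, ?_, ih3⟩
          · rw [List.toFinset_cons, hexp]
            exact ih1
          · rw [List.toFinset_cons, ih2, hcardexp]
            push_cast
            ring

-- ========== the component partition (shared semantic layer) ==========

-- zero pixel in bounds
def pvZero (binary : List Int) (i : Int) : Bool :=
  decide (0 ≤ i) && decide (i < (binary.length : Int)) &&
  decide (PySem.List.pyGetD binary i 0 = 0)

-- the connected component of a pixel (unblocked closure from {i})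
noncomputable def pvComp (binary : List Int) (width : Int) (i : Int) : Finset ℤ :=
  pvCl binary width ∅ {i}

lemma pvComp_self (binary : List Int) (width : Int) (i : Int) :
    i ∈ pvComp binary width i :=
  mem_pvCl.mpr (pvReach.seed (Finset.mem_singleton_self i))

-- minimal index of the component
noncomputable def pvRep (binary : List Int) (width : Int) (i : Int) : Int :=
  (pvComp binary width i).min' ⟨i, pvComp_self binary width i⟩

lemma mem_pvNbr {binary : List Int} {width i j : Int} :
    j ∈ pvNbr binary width i ↔
      (∃ d ∈ pvDeltasA width, i + d = j) ∧ pvOk binary width i j = true := by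
  simp only [pvNbr, pvOkS, List.mem_toFinset, List.mem_filter, List.mem_map]

lemma pvZero_of_mem_pvNbr {binary : List Int} {width i j : Int}
    (h : j ∈ pvNbr binary width i) : pvZero binary j = true := by
  obtain ⟨_, hok⟩ := mem_pvNbr.mp h
  simp only [pvOk, Bool.and_eq_true, decide_eq_true_eq] at hok
  simp only [pvZero, Bool.and_eq_true, decide_eq_true_eq]
  exact ⟨⟨hok.1.1.1, hok.1.1.2⟩, hok.2⟩

lemma pvNbr_symm {binary : List Int} {width i j : Int}
    (hi : pvZero binary i = true) (h : j ∈ pvNbr binary width i) :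
    i ∈ pvNbr binary width j := by
  obtain ⟨⟨d, hd, rfl⟩, hok⟩ := mem_pvNbr.mp h
  simp only [pvOk, Bool.and_eq_true, decide_eq_true_eq] at hok
  simp only [pvZero, Bool.and_eq_true, decide_eq_true_eq] at hi
  refine mem_pvNbr.mpr ⟨⟨-d, ?_, by ring⟩, ?_⟩
  · have hd' : d = -1 ∨ d = 1 ∨ d = -width ∨ d = width ∨ d = -width - 1 ∨
        d = -width + 1 ∨ d = width - 1 ∨ d = width + 1 := by
      simpa [pvDeltasA] using hd
    have : -d = -1 ∨ -d = 1 ∨ -d = -width ∨ -d = width ∨ -d = -width - 1 ∨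
        -d = -width + 1 ∨ -d = width - 1 ∨ -d = width + 1 := by omega
    simpa [pvDeltasA] using this
  · simp only [pvOk, Bool.and_eq_true, decide_eq_true_eq]
    exact ⟨⟨⟨hi.1.1, hi.1.2⟩, by omega⟩, hi.2⟩

lemma pvZero_of_mem_comp {binary : List Int} {width i x : Int}
    (hi : pvZero binary i = true) (hx : x ∈ pvComp binary width i) :
    pvZero binary x = true := by
  have hr := mem_pvCl.mp hx
  induction hr with
  | seed h => rwa [Finset.mem_singleton.mp h]
  | step _ hn _ _ => exact pvZero_of_mem_pvNbr hn

lemma pvReach_trans {binary : List Int} {width : Int} {i x y : Int}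
    (hx : pvReach binary width ∅ {i} x) (hy : pvReach binary width ∅ {x} y) :
    pvReach binary width ∅ {i} y := by
  induction hy with
  | seed h => rwa [Finset.mem_singleton.mp h]
  | step _ hn hv ih => exact pvReach.step ih hn hv

lemma pvComp_subset {binary : List Int} {width i x : Int}
    (hx : x ∈ pvComp binary width i) :
    pvComp binary width x ⊆ pvComp binary width i := by
  intro y hy
  exact mem_pvCl.mpr (pvReach_trans (mem_pvCl.mp hx) (mem_pvCl.mp hy))

lemma pvComp_symm {binary : List Int} {width i x : Int}
    (hi : pvZero binary i = true) (hx : x ∈ pvComp binary width i) :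
    i ∈ pvComp binary width x := by
  have hr := mem_pvCl.mp hx
  clear hx
  induction hr with
  | seed h =>
      rw [Finset.mem_singleton.mp h] at *
      exact pvComp_self binary width i
  | @step p y hp hn _ ih =>
      have hzp : pvZero binary p = true := pvZero_of_mem_comp hi (mem_pvCl.mpr hp)
      have hpy : p ∈ pvNbr binary width y := pvNbr_symm hzp hn
      have hpy' : p ∈ pvComp binary width y :=
        mem_pvCl.mpr (pvReach.step (pvReach.seed (Finset.mem_singleton_self y)) hpy
          (Finset.notMem_empty p))
      exact pvComp_subset hpy' ih

lemma pvComp_eq {binary : List Int} {width i x : Int}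
    (hi : pvZero binary i = true) (hx : x ∈ pvComp binary width i) :
    pvComp binary width x = pvComp binary width i := by
  refine le_antisymm (pvComp_subset hx) (pvComp_subset (pvComp_symm hi hx))

lemma pvRep_mem (binary : List Int) (width : Int) (i : Int) :
    pvRep binary width i ∈ pvComp binary width i :=
  Finset.min'_mem _ _

lemma pvRep_le (binary : List Int) (width : Int) (i : Int) :
    pvRep binary width i ≤ i :=
  Finset.min'_le _ _ (pvComp_self binary width i)

lemma pvRep_eq_of_mem {binary : List Int} {width i x : Int}
    (hi : pvZero binary i = true) (hx : x ∈ pvComp binary width i) :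
    pvRep binary width x = pvRep binary width i := by
  have hc := pvComp_eq hi hx
  refine le_antisymm ?_ ?_
  · exact Finset.min'_le _ _ (hc ▸ pvRep_mem binary width i)
  · exact Finset.min'_le _ _ (hc ▸ pvRep_mem binary width x)

lemma pvZero_rep {binary : List Int} {width i : Int}
    (hi : pvZero binary i = true) : pvZero binary (pvRep binary width i) = true :=
  pvZero_of_mem_comp hi (pvRep_mem binary width i)

lemma pvRep_idem {binary : List Int} {width i : Int}
    (hi : pvZero binary i = true) :
    pvRep binary width (pvRep binary width i) = pvRep binary width i :=
  pvRep_eq_of_mem hi (pvRep_mem binary width i)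

lemma pvRep_nonneg {binary : List Int} {width i : Int}
    (hi : pvZero binary i = true) : 0 ≤ pvRep binary width i := by
  have := pvZero_rep (width := width) hi
  simp only [pvZero, Bool.and_eq_true, decide_eq_true_eq] at this
  exact this.1.1

-- membership in a component through its root
lemma pvComp_fiber {binary : List Int} {width r : Int}
    (hr : pvZero binary r = true) (hroot : pvRep binary width r = r) (x : Int) :
    x ∈ pvComp binary width r ↔
      (pvZero binary x = true ∧ pvRep binary width x = r) := by
  constructor
  · intro hx
    exact ⟨pvZero_of_mem_comp hr hx, by rw [pvRep_eq_of_mem hr hx, hroot]⟩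
  · rintro ⟨hzx, hrx⟩
    have : r ∈ pvComp binary width x := hrx ▸ pvRep_mem binary width x
    exact pvComp_symm hzx this

-- a blocked closure is the free closure when the blocked set misses it (except the seed)
lemma pvCl_eq_of_blocked {binary : List Int} {width : Int} {v S : Finset ℤ}
    (h : ∀ y ∈ pvCl binary width ∅ S, y ∉ v ∨ y ∈ S) :
    pvCl binary width v S = pvCl binary width ∅ S := by
  ext x
  simp only [mem_pvCl]
  constructor
  · intro hx
    induction hx with
    | seed hs => exact pvReach.seed hs
    | step _ hn _ ih => exact pvReach.step ih hn (Finset.notMem_empty _)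
  · intro hx
    induction hx with
    | seed hs => exact pvReach.seed hs
    | @step p y hp hn _ ih =>
        have hy : y ∈ pvCl binary width ∅ S :=
          mem_pvCl.mpr (pvReach.step hp hn (Finset.notMem_empty _))
        rcases h y hy with hv | hs
        · exact pvReach.step ih hn hv
        · exact pvReach.seed hs

-- ========== B-side machinery: balls and min labels ==========

-- radius-t ball around i inside the zero pixels (the set whose labels contribute to i after t rounds)
def pvM (binary : List Int) (width : Int) : Nat → Int → Finset ℤ
  | 0, i => if pvZero binary i then {i} else ∅
  | t + 1, i =>
      if pvZero binary i then
        insert i ((pvNbr binary width i).biUnion (fun j => pvM binary width t j))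
      else ∅

lemma pvM_not_zero {binary : List Int} {width : Int} {t : Nat} {i : Int}
    (h : ¬ pvZero binary i = true) : pvM binary width t i = ∅ := by
  cases t <;> simp [pvM, h]

lemma pvM_self {binary : List Int} {width : Int} {t : Nat} {i : Int}
    (h : pvZero binary i = true) : i ∈ pvM binary width t i := by
  cases t <;> simp [pvM, h]

lemma pvM_zero_of_mem {binary : List Int} {width : Int} :
    ∀ {t : Nat} {i x : Int}, x ∈ pvM binary width t i → pvZero binary x = true := by
  intro t
  induction t with
  | zero =>
      intro i x hx
      by_cases h : pvZero binary i = true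
      · simp only [pvM, h, if_true, Finset.mem_singleton] at hx
        exact hx ▸ h
      · simp [pvM_not_zero h] at hx
  | succ t ih =>
      intro i x hx
      by_cases h : pvZero binary i = true
      · simp only [pvM, h, if_true, Finset.mem_insert, Finset.mem_biUnion] at hx
        rcases hx with rfl | ⟨j, _, hxj⟩
        · exact h
        · exact ih hxj
      · simp [pvM_not_zero h] at hx

lemma pvM_sub_comp {binary : List Int} {width : Int} :
    ∀ {t : Nat} {i : Int}, pvZero binary i = true →
      pvM binary width t i ⊆ pvComp binary width i := by
  intro t
  induction t with
  | zero =>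
      intro i hi x hx
      simp only [pvM, hi, if_true, Finset.mem_singleton] at hx
      exact hx ▸ pvComp_self binary width i
  | succ t ih =>
      intro i hi x hx
      simp only [pvM, hi, if_true, Finset.mem_insert, Finset.mem_biUnion] at hx
      rcases hx with heq | ⟨j, hj, hxj⟩
      · rw [heq]; exact pvComp_self binary width i
      · have hji : j ∈ pvComp binary width i :=
          mem_pvCl.mpr (pvReach.step (pvReach.seed (Finset.mem_singleton_self i)) hj
            (Finset.notMem_empty j))
        have hzj : pvZero binary j = true := pvZero_of_mem_pvNbr hj
        exact pvComp_subset hji (ih hzj hxj)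

lemma pvM_mono {binary : List Int} {width : Int} :
    ∀ {t : Nat} {i : Int}, pvM binary width t i ⊆ pvM binary width (t + 1) i := by
  intro t
  induction t with
  | zero =>
      intro i x hx
      by_cases h : pvZero binary i = true
      · simp only [pvM, h, if_true, Finset.mem_singleton] at hx
        simp [pvM, h, hx]
      · simp [pvM_not_zero h] at hx
  | succ t ih =>
      intro i x hx
      by_cases h : pvZero binary i = true
      · simp only [pvM, h, if_true, Finset.mem_insert, Finset.mem_biUnion] at hx ⊢
        rcases hx with rfl | ⟨j, hj, hxj⟩
        · exact Or.inl rfl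
        · exact Or.inr ⟨j, hj, ih hxj⟩
      · simp [pvM_not_zero h] at hx

lemma pvM_mono_le {binary : List Int} {width : Int} {s t : Nat} (h : s ≤ t) {i : Int} :
    pvM binary width s i ⊆ pvM binary width t i := by
  induction t with
  | zero => simpa [Nat.le_zero.mp h]
  | succ t ih =>
      rcases Nat.lt_or_ge s (t + 1) with hlt | hge
      · exact (ih (by omega)).trans pvM_mono
      · have : s = t + 1 := by omega
        simp [this]

lemma pvM_trans {binary : List Int} {width : Int} :
    ∀ {s : Nat} {t : Nat} {i p q : Int}, p ∈ pvM binary width s i →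
      q ∈ pvM binary width t p → q ∈ pvM binary width (s + t) i := by
  intro s
  induction s with
  | zero =>
      intro t i p q hp hq
      by_cases h : pvZero binary i = true
      · simp only [pvM, h, if_true, Finset.mem_singleton] at hp
        simpa [hp] using hq
      · simp [pvM_not_zero h] at hp
  | succ s ih =>
      intro t i p q hp hq
      by_cases h : pvZero binary i = true
      · simp only [pvM, h, if_true, Finset.mem_insert, Finset.mem_biUnion] at hp
        rcases hp with rfl | ⟨j, hj, hpj⟩
        · exact pvM_mono_le (by omega) hq
        · have : q ∈ pvM binary width (s + t) j := ih hpj hq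
          have harith : s + 1 + t = (s + t) + 1 := by omega
          rw [harith]
          simp only [pvM, h, if_true, Finset.mem_insert, Finset.mem_biUnion]
          exact Or.inr ⟨j, hj, this⟩
      · simp [pvM_not_zero h] at hp

lemma pvM_symm {binary : List Int} {width : Int} :
    ∀ {t : Nat} {i x : Int}, pvZero binary i = true →
      x ∈ pvM binary width t i → i ∈ pvM binary width t x := by
  intro t
  induction t with
  | zero =>
      intro i x hi hx
      simp only [pvM, hi, if_true, Finset.mem_singleton] at hx
      subst hx
      exact pvM_self hi
  | succ t ih =>
      intro i x hi hx
      simp only [pvM, hi, if_true, Finset.mem_insert, Finset.mem_biUnion] at hx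
      rcases hx with rfl | ⟨j, hj, hxj⟩
      · exact pvM_self hi
      · have hzj : pvZero binary j = true := pvZero_of_mem_pvNbr hj
        have hjx : j ∈ pvM binary width t x := ih hzj hxj
        have hinb : i ∈ pvNbr binary width j := pvNbr_symm hi hj
        have hi1 : i ∈ pvM binary width 1 j := by
          simp only [pvM, hzj, if_true, Finset.mem_insert, Finset.mem_biUnion]
          exact Or.inr ⟨i, hinb, by simp [hi]⟩
        have := pvM_trans hjx hi1
        simpa using this

-- ========== reach-set iteration (for the diameter bound) ==========

def pvF (binary : List Int) (width : Int) (S : Finset ℤ) : Finset ℤ :=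
  S ∪ S.biUnion (fun p => pvNbr binary width p)

def pvC (binary : List Int) (width : Int) : Nat → Int → Finset ℤ
  | 0, i => {i}
  | t + 1, i => pvF binary width (pvC binary width t i)

lemma pvC_self (binary : List Int) (width : Int) :
    ∀ (t : Nat) (i : Int), i ∈ pvC binary width t i := by
  intro t
  induction t with
  | zero => intro i; simp [pvC]
  | succ t ih => intro i; exact Finset.mem_union_left _ (ih i)

lemma pvC_mono {binary : List Int} {width : Int} {t : Nat} {i : Int} :
    pvC binary width t i ⊆ pvC binary width (t + 1) i :=
  Finset.subset_union_left

lemma pvC_sub_comp {binary : List Int} {width : Int} :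
    ∀ {t : Nat} {i : Int}, pvC binary width t i ⊆ pvComp binary width i := by
  intro t
  induction t with
  | zero =>
      intro i x hx
      simp only [pvC, Finset.mem_singleton] at hx
      exact hx ▸ pvComp_self binary width i
  | succ t ih =>
      intro i x hx
      rcases Finset.mem_union.mp hx with hx | hx
      · exact ih hx
      · obtain ⟨p, hp, hxp⟩ := Finset.mem_biUnion.mp hx
        exact mem_pvCl.mpr (pvReach.step (mem_pvCl.mp (ih hp)) hxp (Finset.notMem_empty x))

lemma pvC_fix_comp {binary : List Int} {width : Int} {t : Nat} {i : Int}
    (h : pvC binary width (t + 1) i = pvC binary width t i) :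
    pvComp binary width i ⊆ pvC binary width t i := by
  intro x hx
  have hr := mem_pvCl.mp hx
  clear hx
  induction hr with
  | seed hs => exact Finset.mem_singleton.mp hs ▸ pvC_self binary width t i
  | @step p y hp hn _ ih =>
      have : y ∈ pvC binary width (t + 1) i :=
        Finset.mem_union_right _ (Finset.mem_biUnion.mpr ⟨p, ih, hn⟩)
      rwa [h] at this

lemma pvC_stab {binary : List Int} {width : Int} {t : Nat} {i : Int}
    (h : pvC binary width (t + 1) i = pvC binary width t i) :
    ∀ u, pvC binary width (t + u) i = pvC binary width t i := by
  intro u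
  induction u with
  | zero => rfl
  | succ u ih =>
      have : t + (u + 1) = (t + u) + 1 := by omega
      rw [this]
      show pvF binary width (pvC binary width (t + u) i) = _
      rw [ih]
      exact h

lemma pvC_card_grow {binary : List Int} {width : Int} {i : Int} :
    ∀ t : Nat, (∀ s < t, pvC binary width (s + 1) i ≠ pvC binary width s i) →
      t + 1 ≤ (pvC binary width t i).card := by
  intro t
  induction t with
  | zero => intro _; simp [pvC]
  | succ t ih =>
      intro h
      have h1 := ih (fun s hs => h s (by omega))
      have hss : pvC binary width t i ⊂ pvC binary width (t + 1) i :=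
        Finset.ssubset_iff_subset_ne.mpr ⟨pvC_mono, fun he => h t (by omega) he.symm⟩
      have := Finset.card_lt_card hss
      omega

lemma pvComp_sub_valid {binary : List Int} {width i : Int}
    (hi : pvZero binary i = true) :
    pvComp binary width i ⊆ pvValid binary.length := by
  intro x hx
  have := pvZero_of_mem_comp hi hx
  simp only [pvZero, Bool.and_eq_true, decide_eq_true_eq] at this
  simp [pvValid, Finset.mem_Ico, this.1.1, this.1.2]

lemma pvC_comp {binary : List Int} {width i : Int}
    (hi : pvZero binary i = true) :
    pvC binary width binary.length i = pvComp binary width i := by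
  set N := binary.length with hN
  have hbound : (pvComp binary width i).card ≤ N := by
    have := Finset.card_le_card (pvComp_sub_valid (width := width) hi)
    simpa [pvValid_card] using this
  by_cases hfix : ∀ s < N, pvC binary width (s + 1) i ≠ pvC binary width s i
  · have := pvC_card_grow (binary := binary) (width := width) (i := i) N hfix
    have hsub := pvC_sub_comp (binary := binary) (width := width) (t := N) (i := i)
    have := Finset.card_le_card hsub
    omega
  · push_neg at hfix
    obtain ⟨s, hs, hfx⟩ := hfix
    have hstab := pvC_stab (binary := binary) (width := width) hfx
    have hC : pvC binary width N i = pvC binary width s i := by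
      have := hstab (N - s)
      rwa [Nat.add_sub_cancel' (by omega)] at this
    refine le_antisymm pvC_sub_comp ?_
    rw [hC]
    exact pvC_fix_comp hfx

lemma pvC_sub_M {binary : List Int} {width : Int} :
    ∀ {t : Nat} {i : Int}, pvZero binary i = true →
      pvC binary width t i ⊆ pvM binary width t i := by
  intro t
  induction t with
  | zero =>
      intro i hi x hx
      simp only [pvC, Finset.mem_singleton] at hx
      rw [hx]; exact pvM_self hi
  | succ t ih =>
      intro i hi x hx
      rcases Finset.mem_union.mp hx with hx | hx
      · exact pvM_mono (ih hi hx)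
      · obtain ⟨p, hp, hxp⟩ := Finset.mem_biUnion.mp hx
        have hzp : pvZero binary p = true :=
          pvZero_of_mem_comp hi (pvC_sub_comp hp)
        have hzx : pvZero binary x = true := pvZero_of_mem_pvNbr hxp
        -- i ∈ M (t+1) x, then flip with symmetry
        have hiMp : i ∈ pvM binary width t p := pvM_symm hi (ih hi hp)
        have hpNx : p ∈ pvNbr binary width x := pvNbr_symm hzp hxp
        have hiM : i ∈ pvM binary width (t + 1) x := by
          simp only [pvM, hzx, if_true, Finset.mem_insert, Finset.mem_biUnion]
          exact Or.inr ⟨p, hpNx, hiMp⟩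
        exact pvM_symm hzx hiM

lemma pvM_comp {binary : List Int} {width i : Int}
    (hi : pvZero binary i = true) :
    pvM binary width binary.length i = pvComp binary width i := by
  refine le_antisymm (pvM_sub_comp hi) ?_
  intro x hx
  exact pvC_sub_M hi (by rw [pvC_comp hi]; exact hx)

-- the ideal label of pixel i after t rounds
noncomputable def pvLbl (binary : List Int) (width : Int) (t : Nat) (i : Int) : Int :=
  if h : (pvM binary width t i).Nonempty then (pvM binary width t i).min' h else -1

lemma pvM_nonempty_iff {binary : List Int} {width : Int} {t : Nat} {i : Int} :
    (pvM binary width t i).Nonempty ↔ pvZero binary i = true := by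
  constructor
  · rintro ⟨x, hx⟩
    by_contra h
    simp [pvM_not_zero h] at hx
  · intro h
    exact ⟨i, pvM_self h⟩

lemma pvLbl_of_zero {binary : List Int} {width : Int} {t : Nat} {i : Int}
    (h : pvZero binary i = true) :
    pvLbl binary width t i = (pvM binary width t i).min' (pvM_nonempty_iff.mpr h) := by
  simp [pvLbl, pvM_nonempty_iff.mpr h]

lemma pvLbl_of_not_zero {binary : List Int} {width : Int} {t : Nat} {i : Int}
    (h : ¬ pvZero binary i = true) : pvLbl binary width t i = -1 := by
  simp [pvLbl, pvM_not_zero h]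

lemma pvLbl_mem {binary : List Int} {width : Int} {t : Nat} {i : Int}
    (h : pvZero binary i = true) : pvLbl binary width t i ∈ pvM binary width t i := by
  rw [pvLbl_of_zero h]
  exact Finset.min'_mem _ _

lemma pvLbl_nonneg_iff {binary : List Int} {width : Int} {t : Nat} {i : Int} :
    0 ≤ pvLbl binary width t i ↔ pvZero binary i = true := by
  constructor
  · intro h
    by_contra hz
    rw [pvLbl_of_not_zero hz] at h
    omega
  · intro h
    have hm := pvLbl_mem (width := width) (t := t) h
    have := pvM_zero_of_mem hm
    simp only [pvZero, Bool.and_eq_true, decide_eq_true_eq] at this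
    exact this.1.1

lemma pvLbl_final {binary : List Int} {width i : Int}
    (hi : pvZero binary i = true) :
    pvLbl binary width binary.length i = pvRep binary width i := by
  rw [pvLbl_of_zero hi]
  have hM := pvM_comp (width := width) hi
  refine le_antisymm ?_ ?_
  · exact Finset.min'_le _ _ (by rw [hM]; exact pvRep_mem binary width i)
  · exact Finset.min'_le _ _ (by rw [← hM] at *; exact Finset.min'_mem _ _)

-- ========== the relax step computes the next ideal label ==========

lemma pv_foldl_min (l : List Int) :
    ∀ b : Int, l.foldl min b =
      (insert b l.toFinset).min' ⟨b, Finset.mem_insert_self b _⟩ := by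
  induction l with
  | nil => intro b; simp
  | cons c l ih =>
      intro b
      simp only [List.foldl_cons, List.toFinset_cons, ih (min b c)]
      have hself : (insert (min b c) l.toFinset).min' ⟨min b c, Finset.mem_insert_self _ _⟩
          ≤ min b c :=
        Finset.min'_le _ _ (Finset.mem_insert_self _ _)
      refine le_antisymm ?_ ?_
      · apply Finset.le_min'
        intro y hy
        rcases Finset.mem_insert.mp hy with heq | hy'
        · rw [heq]; exact le_trans hself (min_le_left _ _)
        · rcases Finset.mem_insert.mp hy' with heq | hy''
          · rw [heq]; exact le_trans hself (min_le_right _ _)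
          · exact Finset.min'_le _ _ (Finset.mem_insert_of_mem hy'')
      · apply Finset.le_min'
        intro y hy
        rcases Finset.mem_insert.mp hy with heq | hy'
        · rw [heq]
          rcases min_choice b c with h | h
          · rw [h]; exact Finset.min'_le _ _ (Finset.mem_insert_self _ _)
          · rw [h]
            exact Finset.min'_le _ _ (Finset.mem_insert_of_mem (Finset.mem_insert_self _ _))
        · exact Finset.min'_le _ _ (Finset.mem_insert_of_mem (Finset.mem_insert_of_mem hy'))

lemma pvRelaxB_fold (binary labels : List Int) (width : Int) (i : Int)
    (t : Nat)
    (hL : ∀ j : Int, 0 ≤ j → j < (binary.length : Int) →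
      PySem.List.pyGetD labels j 0 = pvLbl binary width t j) :
    ∀ (ds : List Int) (b : Int),
      ds.foldl (fun best d =>
        let j := i + d
        if 0 ≤ j ∧ j < (binary.length : Int) ∧
            (PySem.Int.mod j width - PySem.Int.mod i width).natAbs ≤ 1 ∧
            0 ≤ PySem.List.pyGetD labels j 0 ∧ PySem.List.pyGetD labels j 0 < best
        then PySem.List.pyGetD labels j 0 else best) b
      = (((ds.map (fun d => i + d)).filter (pvOk binary width i)).map
          (pvLbl binary width t)).foldl min b := by
  intro ds
  induction ds with
  | nil => intro b; simp
  | cons d ds ih =>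
      intro b
      simp only [List.foldl_cons, List.map_cons, List.filter_cons]
      by_cases hokB : pvOk binary width i (i + d) = true
      · have hb := pvOk_bounds hokB
        have hLb := hL (i + d) hb.1 hb.2
        have hok' := hokB
        simp only [pvOk, Bool.and_eq_true, decide_eq_true_eq] at hok'
        have hz : pvZero binary (i + d) = true := by
          simp only [pvZero, Bool.and_eq_true, decide_eq_true_eq]
          exact ⟨⟨hok'.1.1.1, hok'.1.1.2⟩, hok'.2⟩
        rw [if_pos hokB]
        simp only [List.map_cons, List.foldl_cons]
        by_cases hlt : PySem.List.pyGetD labels (i + d) 0 < b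
        · rw [if_pos ⟨hok'.1.1.1, hok'.1.1.2, hok'.1.2,
            by rw [hLb]; exact pvLbl_nonneg_iff.mpr hz, hlt⟩, ih]
          congr 1
          have hlt' : pvLbl binary width t (i + d) < b := by rw [← hLb]; exact hlt
          rw [hLb]
          exact (min_eq_right (le_of_lt hlt')).symm
        · rw [if_neg (fun hc => hlt hc.2.2.2.2), ih]
          congr 1
          have hge : b ≤ pvLbl binary width t (i + d) := by rw [← hLb]; omega
          exact (min_eq_left hge).symm
      · rw [if_neg (by
          intro hc
          apply hokB
          simp only [pvOk, Bool.and_eq_true, decide_eq_true_eq]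
          refine ⟨⟨⟨hc.1, hc.2.1⟩, hc.2.2.1⟩, ?_⟩
          have h4 := hc.2.2.2.1
          rw [hL (i + d) hc.1 hc.2.1] at h4
          have hz := pvLbl_nonneg_iff.mp h4
          simp only [pvZero, Bool.and_eq_true, decide_eq_true_eq] at hz
          exact hz.2)]
        rw [if_neg hokB]
        exact ih b

-- min over the new ball, decomposed as self + images of neighbour balls
lemma pv_min_insert_image {binary : List Int} {width : Int} {t : Nat} {i : Int}
    (hi : pvZero binary i = true) :
    (insert (pvLbl binary width t i)
        ((pvNbr binary width i).image (pvLbl binary width t))).min'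
        ⟨_, Finset.mem_insert_self _ _⟩
      = pvLbl binary width (t + 1) i := by
  rw [pvLbl_of_zero (t := t + 1) hi]
  refine le_antisymm ?_ ?_
  · -- every element x of M (t+1) i dominates some candidate
    apply Finset.le_min'
    intro x hx
    simp only [pvM, hi, if_true, Finset.mem_insert, Finset.mem_biUnion] at hx
    rcases hx with rfl | ⟨j, hj, hxj⟩
    · have h1 : pvLbl binary width t x ≤ x := by
        rw [pvLbl_of_zero hi]
        exact Finset.min'_le _ _ (pvM_self hi)
      have h2 : (insert (pvLbl binary width t x)
          ((pvNbr binary width x).image (pvLbl binary width t))).min'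
          ⟨_, Finset.mem_insert_self _ _⟩ ≤ pvLbl binary width t x :=
        Finset.min'_le _ _ (Finset.mem_insert_self _ _)
      omega
    · have hzj : pvZero binary j = true := pvZero_of_mem_pvNbr hj
      have h1 : pvLbl binary width t j ≤ x := by
        rw [pvLbl_of_zero hzj]
        exact Finset.min'_le _ _ hxj
      have h2 : (insert (pvLbl binary width t i)
          ((pvNbr binary width i).image (pvLbl binary width t))).min'
          ⟨_, Finset.mem_insert_self _ _⟩ ≤ pvLbl binary width t j :=
        Finset.min'_le _ _ (Finset.mem_insert_of_mem (Finset.mem_image_of_mem _ hj))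
      omega
  · -- conversely the minimum of M (t+1) i is below every candidate
    apply Finset.le_min'
    intro y hy
    rcases Finset.mem_insert.mp hy with rfl | hy
    · refine Finset.min'_le _ _ ?_
      have : pvLbl binary width t i ∈ pvM binary width t i := pvLbl_mem hi
      exact pvM_mono this
    · obtain ⟨j, hj, rfl⟩ := Finset.mem_image.mp hy
      refine Finset.min'_le _ _ ?_
      have hzj : pvZero binary j = true := pvZero_of_mem_pvNbr hj
      have : pvLbl binary width t j ∈ pvM binary width t j := pvLbl_mem hzj
      simp only [pvM, hi, if_true, Finset.mem_insert, Finset.mem_biUnion]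
      exact Or.inr ⟨j, hj, this⟩

-- the relax step is exact: it maps labels(t) to labels(t+1)
lemma pvRelaxB_spec (binary labels : List Int) (width : Int) (t : Nat) (i : Int)
    (hi0 : 0 ≤ i) (hin : i < (binary.length : Int))
    (hL : ∀ j : Int, 0 ≤ j → j < (binary.length : Int) →
      PySem.List.pyGetD labels j 0 = pvLbl binary width t j) :
    pvRelaxB binary labels width (binary.length : Int) i = pvLbl binary width (t + 1) i := by
  unfold pvRelaxB
  rw [hL i hi0 hin]
  by_cases hz : pvZero binary i = true
  · rw [if_neg (by have := (pvLbl_nonneg_iff (t := t) (width := width)).mpr hz; omega)]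
    rw [pvRelaxB_fold binary labels width i t hL (pvDeltasB width) (pvLbl binary width t i)]
    rw [pv_foldl_min]
    have hts : (((pvDeltasB width).map (fun d => i + d)).filter
        (pvOk binary width i)).toFinset = pvNbr binary width i := rfl
    have himg : ((((pvDeltasB width).map (fun d => i + d)).filter
          (pvOk binary width i)).map (pvLbl binary width t)).toFinset
        = (pvNbr binary width i).image (pvLbl binary width t) := by
      rw [← hts]
      ext y; simp
    -- rewrite the underlying set, then apply the ball-min lemma
    have := pv_min_insert_image (width := width) (t := t) hz
    rw [← this]
    congr 1
    rw [himg]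
  · rw [if_pos (by rw [pvLbl_of_not_zero (t := t) (width := width) hz]; omega),
      pvLbl_of_not_zero (t := t + 1) hz]

-- ========== the label list through the rounds ==========

noncomputable def pvLbls (binary : List Int) (width : Int) (t : Nat) : List Int :=
  (PySem.List.pyRange 0 (binary.length : Int) 1).map (pvLbl binary width t)

lemma pvLbls_getD {binary : List Int} {width : Int} {t : Nat} {j : Int}
    (h0 : 0 ≤ j) (hn : j < (binary.length : Int)) :
    PySem.List.pyGetD (pvLbls binary width t) j 0 = pvLbl binary width t j :=
  PySem.List.pyGetD_map_pyRange_of_nonneg _ _ _ _ h0 hn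

lemma pvLbls_length (binary : List Int) (width : Int) (t : Nat) :
    (pvLbls binary width t).length = binary.length := by
  simp [pvLbls, PySem.List.length_pyRange_one]

lemma pvStepRound_lbls (binary : List Int) (width : Int) (t : Nat) :
    pvStepRoundB binary width (binary.length : Int) (pvLbls binary width t)
      = pvLbls binary width (t + 1) := by
  unfold pvStepRoundB
  apply List.map_congr_left
  intro i hi
  rw [PySem.List.mem_pyRange_one] at hi
  exact pvRelaxB_spec binary _ width t i hi.1 hi.2 (fun j h0 hn => pvLbls_getD h0 hn)

lemma pvLbls_init (binary : List Int) (width : Int) :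
    (PySem.List.pyRange 0 (binary.length : Int) 1).map
        (fun i => if PySem.List.pyGetD binary i 0 = 0 then i else -1)
      = pvLbls binary width 0 := by
  apply List.map_congr_left
  intro i hi
  rw [PySem.List.mem_pyRange_one] at hi
  by_cases hz : pvZero binary i = true
  · have hb : PySem.List.pyGetD binary i 0 = 0 := by
      simp only [pvZero, Bool.and_eq_true, decide_eq_true_eq] at hz; exact hz.2
    rw [if_pos hb]
    simp [pvLbl, pvM, hz]
  · have hb : ¬ PySem.List.pyGetD binary i 0 = 0 := fun hc => hz (by
      simp only [pvZero, Bool.and_eq_true, decide_eq_true_eq]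
      exact ⟨⟨hi.1, hi.2⟩, hc⟩)
    rw [if_neg hb, pvLbl_of_not_zero hz]

lemma pvLbls_stab (binary : List Int) (width : Int) (t : Nat)
    (h : pvLbls binary width (t + 1) = pvLbls binary width t) :
    ∀ u, pvLbls binary width (t + u) = pvLbls binary width t := by
  intro u
  induction u with
  | zero => rfl
  | succ u ih =>
      have harith : t + (u + 1) = (t + u) + 1 := by omega
      rw [harith, ← pvStepRound_lbls binary width (t + u), ih,
        pvStepRound_lbls binary width t, h]

lemma pvRounds_lbls (binary : List Int) (width : Int) :
    ∀ (f : Nat) (t : Nat),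
      pvRoundsB binary width (binary.length : Int) f (pvLbls binary width t)
        = pvLbls binary width (t + f) := by
  intro f
  induction f with
  | zero => intro t; rfl
  | succ f ih =>
      intro t
      show (if pvStepRoundB binary width (binary.length : Int) (pvLbls binary width t)
            = pvLbls binary width t then pvLbls binary width t
          else pvRoundsB binary width (binary.length : Int) f
            (pvStepRoundB binary width (binary.length : Int) (pvLbls binary width t)))
        = pvLbls binary width (t + (f + 1))
      rw [pvStepRound_lbls]
      by_cases hfix : pvLbls binary width (t + 1) = pvLbls binary width t
      · rw [if_pos hfix]
        exact (pvLbls_stab binary width t hfix (f + 1)).symm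
      · rw [if_neg hfix, ih (t + 1)]
        congr 1
        omega

-- ========== roots and counting ==========

noncomputable def pvRootQ (binary : List Int) (width : Int) (r : Int) : Bool :=
  pvZero binary r && decide (pvRep binary width r = r)

noncomputable def pvSmallQ (binary : List Int) (width : Int) (r : Int) : Bool :=
  pvRootQ binary width r && decide ((pvComp binary width r).card < 40)

noncomputable def pvVisSet (binary : List Int) (width : Int) (k : Int) : Finset ℤ :=
  (Finset.Ico (0 : ℤ) (binary.length : Int)).filter
    (fun x => (pvZero binary x && decide (pvRep binary width x < k)) = true)

noncomputable def pvRoots (binary : List Int) (width : Int) (k : Int) : Finset ℤ :=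
  (Finset.Ico k (binary.length : Int)).filter (fun r => pvRootQ binary width r = true)

noncomputable def pvSmallRoots (binary : List Int) (width : Int) (k : Int) : Finset ℤ :=
  (Finset.Ico k (binary.length : Int)).filter (fun r => pvSmallQ binary width r = true)

-- a 0/1 count over a duplicate-free list is a cardinality
lemma pv_countP_toFinset (q : Int → Bool) :
    ∀ {l : List Int}, l.Nodup →
      l.countP q = (l.toFinset.filter (fun j => q j = true)).card := by
  intro l
  induction l with
  | nil => intro _; simp
  | cons a l ih =>
      intro h
      obtain ⟨ha, hl⟩ := List.nodup_cons.mp h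
      rw [List.countP_cons, List.toFinset_cons, Finset.filter_insert, ih hl]
      by_cases hq : q a = true
      · simp only [if_pos hq]
        rw [Finset.card_insert_of_notMem (by simp [Finset.mem_filter, ha])]
      · rw [if_neg hq]
        have hf : q a = false := by simpa using hq
        simp [hf]

lemma pvCountP_card (q : Int → Bool) (a b : Int) :
    (PySem.List.pyRange a b 1).countP q
      = ((Finset.Ico a b).filter (fun j => q j = true)).card := by
  rw [pv_countP_toFinset q (PySem.List.nodup_pyRange_one a b)]
  congr 1
  congr 1
  ext x
  simp [PySem.List.mem_pyRange_one, Finset.mem_Ico]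

lemma pvZero_bounds {binary : List Int} {i : Int} (h : pvZero binary i = true) :
    0 ≤ i ∧ i < (binary.length : Int) := by
  simp only [pvZero, Bool.and_eq_true, decide_eq_true_eq] at h
  exact h.1

lemma pvNoRoot {binary : List Int} {width : Int} {k : Int}
    (hnr : ¬ (pvZero binary k = true ∧ pvRep binary width k = k)) :
    ∀ x : Int, ¬ (pvZero binary x = true ∧ pvRep binary width x = k) := by
  rintro x ⟨hzx, hrx⟩
  apply hnr
  constructor
  · rw [← hrx]; exact pvZero_rep hzx
  · have := pvRep_idem (width := width) hzx
    rw [hrx] at this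
    exact this

lemma pvVisSet_skip {binary : List Int} {width : Int} {k : Int}
    (hnr : ¬ (pvZero binary k = true ∧ pvRep binary width k = k)) :
    pvVisSet binary width (k + 1) = pvVisSet binary width k := by
  ext x
  simp only [pvVisSet, Finset.mem_filter, Finset.mem_Ico, Bool.and_eq_true, decide_eq_true_eq]
  constructor
  · rintro ⟨hb, hz, hlt⟩
    refine ⟨hb, hz, ?_⟩
    by_cases hlt' : pvRep binary width x < k
    · exact hlt'
    · exact absurd ⟨hz, by omega⟩ (fun hc => pvNoRoot hnr x hc)
  · rintro ⟨hb, hz, hlt⟩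
    exact ⟨hb, hz, by omega⟩

lemma pvRoots_skip {binary : List Int} {width : Int} {k : Int}
    (hnr : ¬ (pvZero binary k = true ∧ pvRep binary width k = k)) :
    pvRoots binary width (k + 1) = pvRoots binary width k := by
  ext r
  simp only [pvRoots, Finset.mem_filter, Finset.mem_Ico]
  constructor
  · rintro ⟨⟨h1, h2⟩, h3⟩
    exact ⟨⟨by omega, h2⟩, h3⟩
  · rintro ⟨⟨h1, h2⟩, h3⟩
    refine ⟨⟨?_, h2⟩, h3⟩
    rcases eq_or_lt_of_le h1 with heq | hlt
    · exfalso
      apply hnr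
      have h3' := h3
      simp only [pvRootQ, Bool.and_eq_true, decide_eq_true_eq] at h3'
      rw [heq]
      exact h3'
    · omega

lemma pvSmallRoots_skip {binary : List Int} {width : Int} {k : Int}
    (hnr : ¬ (pvZero binary k = true ∧ pvRep binary width k = k)) :
    pvSmallRoots binary width (k + 1) = pvSmallRoots binary width k := by
  ext r
  simp only [pvSmallRoots, Finset.mem_filter, Finset.mem_Ico]
  constructor
  · rintro ⟨⟨h1, h2⟩, h3⟩
    exact ⟨⟨by omega, h2⟩, h3⟩
  · rintro ⟨⟨h1, h2⟩, h3⟩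
    refine ⟨⟨?_, h2⟩, h3⟩
    rcases eq_or_lt_of_le h1 with heq | hlt
    · exfalso
      apply hnr
      have h3' := h3
      simp only [pvSmallQ, pvRootQ, Bool.and_eq_true, decide_eq_true_eq] at h3'
      rw [heq]
      exact h3'.1
    · omega

lemma pvFresh_cl {binary : List Int} {width : Int} {k : Int}
    (hz : pvZero binary k = true) (hroot : pvRep binary width k = k) :
    pvCl binary width (insert k (pvVisSet binary width k)) {k}
      = pvComp binary width k := by
  have hfib := pvComp_fiber (width := width) hz hroot
  refine pvCl_eq_of_blocked ?_
  intro y hy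
  by_cases hyk : y = k
  · exact Or.inr (by simp [hyk])
  · left
    intro hmem
    rcases Finset.mem_insert.mp hmem with h | h
    · exact hyk h
    · have hfy := (hfib y).mp hy
      simp only [pvVisSet, Finset.mem_filter, Bool.and_eq_true, decide_eq_true_eq] at h
      omega

lemma pvFresh_vis {binary : List Int} {width : Int} {k : Int}
    (hz : pvZero binary k = true) (hroot : pvRep binary width k = k) :
    insert k (pvVisSet binary width k) ∪ pvComp binary width k
      = pvVisSet binary width (k + 1) := by
  have hfib := pvComp_fiber (width := width) hz hroot
  have hbk := pvZero_bounds hz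
  ext x
  simp only [Finset.mem_union, Finset.mem_insert, pvVisSet, Finset.mem_filter,
    Finset.mem_Ico, Bool.and_eq_true, decide_eq_true_eq]
  constructor
  · rintro ((rfl | ⟨hb, hzx, hlt⟩) | hx)
    · exact ⟨hbk, hz, by omega⟩
    · exact ⟨hb, hzx, by omega⟩
    · obtain ⟨hzx, hrx⟩ := (hfib x).mp hx
      exact ⟨pvZero_bounds hzx, hzx, by omega⟩
  · rintro ⟨hb, hzx, hlt⟩
    by_cases hlt' : pvRep binary width x < k
    · exact Or.inl (Or.inr ⟨hb, hzx, hlt'⟩)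
    · exact Or.inr ((hfib x).mpr ⟨hzx, by omega⟩)

lemma pvFresh_roots {binary : List Int} {width : Int} {k : Int}
    (hz : pvZero binary k = true) (hroot : pvRep binary width k = k) :
    pvRoots binary width k = insert k (pvRoots binary width (k + 1)) ∧
    k ∉ pvRoots binary width (k + 1) := by
  have hbk := pvZero_bounds hz
  constructor
  · ext r
    simp only [pvRoots, Finset.mem_filter, Finset.mem_Ico, Finset.mem_insert]
    constructor
    · rintro ⟨⟨h1, h2⟩, h3⟩
      by_cases hrk : r = k
      · exact Or.inl hrk
      · exact Or.inr ⟨⟨by omega, h2⟩, h3⟩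
    · rintro (rfl | ⟨⟨h1, h2⟩, h3⟩)
      · refine ⟨⟨le_refl _, hbk.2⟩, ?_⟩
        simp only [pvRootQ, Bool.and_eq_true, decide_eq_true_eq]
        exact ⟨hz, hroot⟩
      · exact ⟨⟨by omega, h2⟩, h3⟩
  · simp only [pvRoots, Finset.mem_filter, Finset.mem_Ico]
    rintro ⟨⟨h1, _⟩, _⟩
    omega

lemma pvFresh_smallRoots {binary : List Int} {width : Int} {k : Int}
    (hz : pvZero binary k = true) (hroot : pvRep binary width k = k) :
    pvSmallRoots binary width k
      = (if (pvComp binary width k).card < 40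
         then insert k (pvSmallRoots binary width (k + 1))
         else pvSmallRoots binary width (k + 1)) ∧
    k ∉ pvSmallRoots binary width (k + 1) := by
  have hbk := pvZero_bounds hz
  constructor
  · by_cases hc : (pvComp binary width k).card < 40
    · rw [if_pos hc]
      ext r
      simp only [pvSmallRoots, Finset.mem_filter, Finset.mem_Ico, Finset.mem_insert]
      constructor
      · rintro ⟨⟨h1, h2⟩, h3⟩
        by_cases hrk : r = k
        · exact Or.inl hrk
        · exact Or.inr ⟨⟨by omega, h2⟩, h3⟩
      · rintro (rfl | ⟨⟨h1, h2⟩, h3⟩)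
        · refine ⟨⟨le_refl _, hbk.2⟩, ?_⟩
          simp only [pvSmallQ, pvRootQ, Bool.and_eq_true, decide_eq_true_eq]
          exact ⟨⟨hz, hroot⟩, hc⟩
        · exact ⟨⟨by omega, h2⟩, h3⟩
    · rw [if_neg hc]
      ext r
      simp only [pvSmallRoots, Finset.mem_filter, Finset.mem_Ico]
      constructor
      · rintro ⟨⟨h1, h2⟩, h3⟩
        refine ⟨⟨?_, h2⟩, h3⟩
        rcases eq_or_lt_of_le h1 with heq | hlt
        · exfalso
          apply hc
          have h3' := h3
          simp only [pvSmallQ, pvRootQ, Bool.and_eq_true, decide_eq_true_eq] at h3'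
          rw [heq]
          exact h3'.2
        · omega
      · rintro ⟨⟨h1, h2⟩, h3⟩
        exact ⟨⟨by omega, h2⟩, h3⟩
  · simp only [pvSmallRoots, Finset.mem_filter, Finset.mem_Ico]
    rintro ⟨⟨h1, _⟩, _⟩
    omega

-- A's outer loop counts exactly the roots (and the small roots) from k upwards
lemma pvOuterA_run (binary : List Int) (width : Int) :
    ∀ (rest : List Int) (k : ℕ) (visA : List Nat) (small total : Int),
    rest = binary.drop k → visA.length = binary.length →
    pvAbsA visA = pvVisSet binary width (k : Int) →
    pvOuterA binary (binary.length : Int) width (PySem.List.enumerate rest (k : Int)) visA small total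
      = (small + ((pvSmallRoots binary width (k : Int)).card : Int),
         total + ((pvRoots binary width (k : Int)).card : Int)) := by
  intro rest
  induction rest with
  | nil =>
      intro k visA small total hdrop hlen habs
      have hk : binary.length ≤ k := by
        by_contra hlt
        push_neg at hlt
        have h := List.length_drop (l := binary) (i := k)
        rw [← hdrop] at h
        simp at h
        omega
      have hIe : Finset.Ico ((k : ℕ) : ℤ) ((binary.length : ℕ) : ℤ) = ∅ :=
        Finset.Ico_eq_empty (by push_neg; exact_mod_cast hk)
      have hR : pvRoots binary width (k : Int) = ∅ := by
        rw [pvRoots, hIe, Finset.filter_empty]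
      have hS : pvSmallRoots binary width (k : Int) = ∅ := by
        rw [pvSmallRoots, hIe, Finset.filter_empty]
      simp [PySem.List.enumerate, pvOuterA, hR, hS]
  | cons val rest ihr =>
      intro k visA small total hdrop hlen habs
      have hk : k < binary.length := by
        by_contra h
        push_neg at h
        rw [List.drop_eq_nil_of_le h] at hdrop
        simp at hdrop
      have hgetk : binary[k]? = some val := by
        have h0 := congrArg (fun l => l[0]?) hdrop
        simp only [List.getElem?_cons_zero, List.getElem?_drop, Nat.add_zero] at h0
        exact h0.symm
      have hgetD : PySem.List.pyGetD binary ((k : ℕ) : ℤ) 0 = val := by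
        rw [PySem.List.pyGetD_natCast]
        simp [List.getD_eq_getElem?_getD, hgetk]
      have hdrop' : rest = binary.drop (k + 1) := by
        have : binary.drop (k + 1) = (binary.drop k).drop 1 := by
          rw [List.drop_drop, Nat.add_comm]
        rw [this, ← hdrop, List.drop_one, List.tail_cons]
      have hvisA : (PySem.List.pyGetD visA ((k : ℕ) : ℤ) 0 ≠ 0) ↔ ((k : ℤ) ∈ pvAbsA visA) := by
        rw [mem_pvAbsA]
        constructor
        · intro h
          exact ⟨Int.natCast_nonneg k, by rw [hlen]; exact_mod_cast hk, h⟩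
        · intro h
          exact h.2.2
      have henum : PySem.List.enumerate (val :: rest) (k : ℤ)
          = ((k : ℤ), val) :: PySem.List.enumerate rest ((k : ℤ) + 1) :=
        PySem.List.enumerate_cons ..
      have hcast : ((k : ℤ) + 1) = (((k + 1 : ℕ)) : ℤ) := by push_cast; ring
      rw [henum, hcast]
      simp only [pvOuterA]
      by_cases hcond : val ≠ 0 ∨ (k : ℤ) ∈ pvAbsA visA
      · -- skip this index: no new component starts here
        have hnr : ¬ (pvZero binary (k : Int) = true ∧
            pvRep binary width (k : Int) = (k : Int)) := by
          rintro ⟨hzk, hrk⟩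
          have hzk' := hzk
          simp only [pvZero, Bool.and_eq_true, decide_eq_true_eq] at hzk'
          rcases hcond with h | h
          · exact h (by rw [← hgetD]; exact hzk'.2)
          · rw [habs] at h
            simp only [pvVisSet, Finset.mem_filter, Bool.and_eq_true, decide_eq_true_eq] at h
            omega
        rw [if_pos (by rcases hcond with h | h
                       · exact Or.inl h
                       · exact Or.inr (hvisA.mpr h))]
        have habs' : pvAbsA visA = pvVisSet binary width ((k + 1 : ℕ) : ℤ) := by
          rw [habs, ← pvVisSet_skip hnr, hcast]
        rw [ihr (k + 1) visA small total hdrop' hlen habs']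
        rw [show (((k + 1 : ℕ)) : ℤ) = (k : ℤ) + 1 by push_cast; ring,
          pvRoots_skip hnr, pvSmallRoots_skip hnr]
      · -- a fresh root: flood its whole component
        push_neg at hcond
        obtain ⟨hval, hnv⟩ := hcond
        have hzk : pvZero binary (k : Int) = true := by
          simp only [pvZero, Bool.and_eq_true, decide_eq_true_eq]
          exact ⟨⟨Int.natCast_nonneg k, by exact_mod_cast hk⟩, by rw [hgetD]; simpa using hval⟩
        have hroot : pvRep binary width (k : Int) = (k : Int) := by
          have hle := pvRep_le binary width (k : Int)
          by_contra hne
          apply hnv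
          rw [habs]
          simp only [pvVisSet, Finset.mem_filter, Finset.mem_Ico, Bool.and_eq_true,
            decide_eq_true_eq]
          exact ⟨⟨Int.natCast_nonneg k, by exact_mod_cast hk⟩, hzk, by omega⟩
        rw [if_neg (by rw [hvisA]; push_neg; exact ⟨hval, hnv⟩)]
        have h0k : (0 : ℤ) ≤ (k : ℤ) := Int.natCast_nonneg k
        have hkz : ((k : ℕ) : ℤ) < (visA.length : ℤ) := by rw [hlen]; exact_mod_cast hk
        have habsA' : pvAbsA (PySem.List.pySetD visA (k : ℤ) 1)
            = insert ((k : ℕ) : ℤ) (pvAbsA visA) := pvAbsA_set h0k hkz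
        have hlenA' : (PySem.List.pySetD visA (k : ℤ) 1).length = binary.length := by
          rw [PySem.List.length_pySetD, hlen]
        have hfuel : (pvValid binary.length \ pvAbsA (PySem.List.pySetD visA (k : ℤ) 1)).card + [(k : ℤ)].length
            ≤ binary.length + 1 := by
          have h1 : (pvValid binary.length \ pvAbsA (PySem.List.pySetD visA (k : ℤ) 1)).card
              ≤ (pvValid binary.length).card :=
            Finset.card_le_card (Finset.sdiff_subset)
          rw [pvValid_card] at h1
          simp only [List.length_cons, List.length_nil]
          omega
        obtain ⟨ra1, ra2, ra3⟩ := pvBfsA_run binary width (binary.length + 1)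
          (PySem.List.pySetD visA (k : ℤ) 1) [(k : ℤ)] 0 hlenA'
          (List.nodup_singleton _)
          (by intro x hx
              obtain rfl := List.mem_singleton.mp hx
              rw [habsA']
              exact Finset.mem_insert_self _ _)
          hfuel
        rw [habsA', habs] at ra1 ra2
        have hsing : ([(k : ℤ)]).toFinset = ({(k : ℤ)} : Finset ℤ) := by simp
        rw [hsing] at ra1 ra2
        rw [pvFresh_cl hzk hroot] at ra1 ra2
        have hsize : (pvBfsA binary (binary.length : ℤ) width (binary.length + 1)
            (PySem.List.pySetD visA (k : ℤ) 1) [(k : ℤ)] 0).2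
            = ((pvComp binary width (k : ℤ)).card : Int) := by
          rw [ra2]; ring
        have habs2 : pvAbsA (pvBfsA binary (binary.length : ℤ) width (binary.length + 1)
            (PySem.List.pySetD visA (k : ℤ) 1) [(k : ℤ)] 0).1
            = pvVisSet binary width ((k + 1 : ℕ) : ℤ) := by
          rw [ra1, pvFresh_vis hzk hroot, hcast]
        rw [ihr (k + 1) _ _ _ hdrop' ra3 habs2]
        obtain ⟨hRins, hRnm⟩ := pvFresh_roots hzk hroot
        obtain ⟨hSins, hSnm⟩ := pvFresh_smallRoots hzk hroot
        have hcast1 : (((k + 1 : ℕ)) : ℤ) = (k : ℤ) + 1 := by push_cast; ring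
        rw [hcast1]
        have hRcard : ((pvRoots binary width ((k : ℤ))).card : Int)
            = ((pvRoots binary width ((k : ℤ) + 1)).card : Int) + 1 := by
          rw [hRins, Finset.card_insert_of_notMem hRnm]
          push_cast
          ring
        by_cases hsz : (pvComp binary width (k : ℤ)).card < 40
        · have hlt : (pvBfsA binary (binary.length : ℤ) width (binary.length + 1)
              (PySem.List.pySetD visA (k : ℤ) 1) [(k : ℤ)] 0).2 < 40 := by
            rw [hsize]; exact_mod_cast hsz
          rw [if_pos hlt]
          have hScard : ((pvSmallRoots binary width ((k : ℤ))).card : Int)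
              = ((pvSmallRoots binary width ((k : ℤ) + 1)).card : Int) + 1 := by
            rw [hSins, if_pos hsz, Finset.card_insert_of_notMem hSnm]
            push_cast
            ring
          rw [hRcard, hScard]
          simp only [Prod.mk.injEq]
          exact ⟨by omega, by omega⟩
        · have hlt : ¬ (pvBfsA binary (binary.length : ℤ) width (binary.length + 1)
              (PySem.List.pySetD visA (k : ℤ) 1) [(k : ℤ)] 0).2 < 40 := by
            rw [hsize]; push_neg; push_neg at hsz; exact_mod_cast hsz
          rw [if_neg hlt]
          have hScard : ((pvSmallRoots binary width ((k : ℤ))).card : Int)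
              = ((pvSmallRoots binary width ((k : ℤ) + 1)).card : Int) := by
            rw [hSins, if_neg hsz]
          rw [hRcard, hScard]
          simp only [Prod.mk.injEq]
          exact ⟨trivial, by omega⟩

-- final labels decide rootness
lemma pvLbl_root_iff {binary : List Int} {width : Int} {j : Int}
    (hb : 0 ≤ j) (hn : j < (binary.length : Int)) :
    ((pvLbl binary width binary.length j == j) = true) ↔ pvRootQ binary width j = true := by
  by_cases hz : pvZero binary j = true
  · rw [pvLbl_final hz]
    simp [pvRootQ, hz, beq_iff_eq]
  · rw [pvLbl_of_not_zero hz]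
    constructor
    · intro h
      rw [beq_iff_eq] at h
      omega
    · intro h
      simp [pvRootQ, hz] at h

-- the fiber of a root in the final labelling is its component
lemma pvCount_fiber {binary : List Int} {width : Int} {j : Int}
    (hzj : pvZero binary j = true) (hroot : pvRep binary width j = j) :
    ((Finset.Ico (0 : ℤ) (binary.length : Int)).filter
        (fun x => (pvLbl binary width binary.length x == j) = true)).card
      = (pvComp binary width j).card := by
  congr 1
  ext x
  simp only [Finset.mem_filter, Finset.mem_Ico, beq_iff_eq]
  rw [pvComp_fiber hzj hroot x]
  constructor
  · rintro ⟨⟨h0, h1⟩, heq⟩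
    by_cases hz : pvZero binary x = true
    · rw [pvLbl_final hz] at heq
      exact ⟨hz, heq⟩
    · rw [pvLbl_of_not_zero hz] at heq
      have := pvZero_bounds hzj
      omega
  · rintro ⟨hzx, hrx⟩
    have hbx := pvZero_bounds hzx
    exact ⟨⟨hbx.1, hbx.2⟩, by rw [pvLbl_final hzx]; exact hrx⟩

lemma pvCount_lbls (binary : List Int) (width : Int) (j : Int) :
    PySem.List.count (pvLbls binary width binary.length) j
      = ((Finset.Ico (0 : ℤ) (binary.length : Int)).filter
          (fun x => (pvLbl binary width binary.length x == j) = true)).card := by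
  rw [PySem.List.count_eq, List.count_eq_countP]
  unfold pvLbls
  rw [List.countP_map]
  exact pvCountP_card (fun x => pvLbl binary width binary.length x == j) 0
    (binary.length : Int)

-- ===== VERDICT (by name: the statement is the Claim_ definition above) =====
theorem component_stats_py_spec : Claim_equal_component_stats_py := by
  intro binary width height _ _
  unfold Spec_component_stats_py component_stats_py component_stats_py_alt
  -- A: the outer loop counts roots and small roots
  have hV0 : pvAbsA (List.replicate binary.length 0) = pvVisSet binary width ((0 : ℕ) : ℤ) := by
    rw [pvAbsA_replicate]
    unfold pvVisSet
    refine (Finset.filter_eq_empty_iff.mpr ?_).symm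
    intro x hx
    simp only [Bool.and_eq_true, decide_eq_true_eq, not_and]
    intro hz
    have := pvRep_nonneg (width := width) hz
    omega
  have hA := pvOuterA_run binary width binary 0 (List.replicate binary.length 0) 0 0
    (by simp) (by simp) hV0
  simp only [Nat.cast_zero, zero_add] at hA
  rw [PySem.List.len_eq]
  rw [hA]
  -- B: the rounds converge to the representative labelling
  simp only [PySem.List.len_eq]
  rw [pvLbls_init binary width, pvRounds_lbls binary width binary.length 0]
  simp only [Nat.zero_add]
  set N := binary.length with hN
  set labels := pvLbls binary width N with hlabels
  have hlen : PySem.List.len labels = (N : Int) := by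
    rw [PySem.List.len_eq, pvLbls_length]
  rw [PySem.List.enumerate_eq_map_pyRange labels 0, hlen]
  rw [List.countP_map, List.countP_map]
  -- total
  have htotal : (List.countP ((fun p => p.2 == p.1) ∘ fun j => (j, PySem.List.pyGetD labels j 0))
      (PySem.List.pyRange 0 (N : Int) 1) : Int)
      = ((pvRoots binary width 0).card : Int) := by
    rw [List.countP_congr (q := fun j => pvRootQ binary width j)
      (by intro x hx
          rw [PySem.List.mem_pyRange_one] at hx
          simp only [Function.comp_apply]
          rw [hlabels, pvLbls_getD hx.1 hx.2]
          exact pvLbl_root_iff hx.1 hx.2)]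
    rw [pvCountP_card]
    rfl
  -- small
  have hsmall : (List.countP ((fun p => p.2 == p.1 &&
        decide (PySem.List.count labels p.1 < 40)) ∘ fun j => (j, PySem.List.pyGetD labels j 0))
      (PySem.List.pyRange 0 (N : Int) 1) : Int)
      = ((pvSmallRoots binary width 0).card : Int) := by
    rw [List.countP_congr (q := fun j => pvSmallQ binary width j)
      (by intro x hx
          rw [PySem.List.mem_pyRange_one] at hx
          simp only [Function.comp_apply]
          rw [hlabels, pvLbls_getD hx.1 hx.2]
          by_cases hr : pvRootQ binary width x = true
          · have hr' := hr
            simp only [pvRootQ, Bool.and_eq_true, decide_eq_true_eq] at hr'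
            have hcnt : PySem.List.count labels x = (pvComp binary width x).card := by
              rw [hlabels, pvCount_lbls, pvCount_fiber hr'.1 hr'.2]
            simp only [Bool.and_eq_true, pvSmallQ, hr, true_and, decide_eq_true_eq, hcnt]
            rw [(pvLbl_root_iff hx.1 hx.2 : _ ↔ pvRootQ binary width x = true)]
            simp only [hr, true_iff, true_and]
            rw [← hlabels, hcnt]
          · have hnb : ¬ ((pvLbl binary width N x == x) = true) := by
              rw [pvLbl_root_iff hx.1 hx.2]
              exact hr
            simp only [Bool.and_eq_true, pvSmallQ, hr]
            constructor
            · rintro ⟨h1, _⟩; exact absurd h1 hnb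
            · rintro h; simp at h)]
    rw [pvCountP_card]
    rfl
  rw [htotal, hsmall]
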